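-- pv_equiv track=rewrite | github.com/Collins-Nnamuka/Advanced-Algorithm- | AdvancedAlgorithmAssignment.py | matching_socks
-- ===== SOURCE A (Python) =====
-- def matching_socks(socks):
--     #Creating a dictionary object to help us calculate the frequency of each color.
--     colorsPairs = {}
--
--     #Looping through the list of socks
--     #checking if the color exists in our dictionary
--     #if it exists we increment the value by one
--     #if it does not exist we initialize it and then set the value as one
--     for sock in socks:
--         if sock not in colorsPairs:
--             colorsPairs[sock] = 1
--         else:
--             colorsPairs[sock] += 1
--
--     #Initializing a variable to store the total number of pairs
--     pairs = 0
--     #Looping through the colors in the dictionary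
--     #While looping through the colors we check add to our
--     #total pair the number of pairs of that color
--     #we get the number of pairs for the color by dividing
--     #its value by 2
--     for pair in colorsPairs:
--         pairs += colorsPairs[pair] // 2
--
--     return "The total number of pairs in this pile is " + str(pairs) + "."
-- ===== SOURCE B (Python) =====
-- def matching_socks(socks):
--     # Single toggling pass: keep the set of socks seen an odd number of times.
--     unpaired = set()
--     pairs = 0
--     for sock in socks:
--         if sock in unpaired:
--             unpaired.remove(sock)
--             pairs += 1
--         else:
--             unpaired.add(sock)
--     return "The total number of pairs in this pile is " + str(pairs) + "."
-- ===== Notes on version B (the rewrite author's own statement) =====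
-- stated objective: alternative
-- what changed: Replaces the count-then-divide two-loop strategy (build a frequency dict, then sum count//2 over its keys) with a single pass that toggles each sock in an 'unpaired' set and counts a pair each time a sock is seen again.
import Mathlib
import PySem

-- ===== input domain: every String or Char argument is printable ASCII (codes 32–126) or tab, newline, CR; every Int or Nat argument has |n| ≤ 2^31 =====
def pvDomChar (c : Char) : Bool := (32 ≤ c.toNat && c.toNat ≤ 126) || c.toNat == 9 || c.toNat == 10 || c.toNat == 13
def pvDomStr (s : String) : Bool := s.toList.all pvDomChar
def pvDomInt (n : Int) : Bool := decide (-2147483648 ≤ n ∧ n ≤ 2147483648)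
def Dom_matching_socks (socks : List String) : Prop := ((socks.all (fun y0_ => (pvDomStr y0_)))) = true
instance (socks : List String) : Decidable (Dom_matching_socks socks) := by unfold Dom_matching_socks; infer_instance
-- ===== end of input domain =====

-- B replaces A's two-loop count-then-divide strategy with a single toggling pass
-- over the socks maintaining a set of unpaired socks (alternative decomposition, same cost).


-- ===== PORT A =====
-- build the frequency dict, then sum value // 2 over its keys, then format
def matching_socks (socks : List String) : String :=
  let colorsPairs : PySem.Dict String Int :=
    socks.foldl (fun d sock =>
      if d.contains sock = false then d.insert sock 1
      else d.insert sock (d.getD sock 0 + 1)) PySem.Dict.empty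
  let pairs : Int :=
    colorsPairs.keys.foldl (fun pairs pair =>
      pairs + PySem.Int.floordiv (colorsPairs.getD pair 0) 2) 0
  "The total number of pairs in this pile is " ++ PySem.Int.toStr pairs ++ "."

-- ===== PORT B =====
-- single pass: toggle each sock in the set of unpaired socks, counting completed pairs
-- (unpaired.remove(sock) is taken in the branch where sock ∈ unpaired, where it is Set.discard)
def matching_socks_alt (socks : List String) : String :=
  let st : PySem.Set String × Int :=
    socks.foldl (fun (st : PySem.Set String × Int) sock =>
      if PySem.Set.contains st.1 sock then (PySem.Set.discard st.1 sock, st.2 + 1)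
      else (PySem.Set.add st.1 sock, st.2)) (PySem.Set.empty, 0)
  "The total number of pairs in this pile is " ++ PySem.Int.toStr st.2 ++ "."

-- ===== PRECONDITION & SPEC =====
def Spec_matching_socks (socks : List String) (out : String) : Prop := out = matching_socks_alt socks
instance (socks : List String) (out : String) : Decidable (Spec_matching_socks socks out) := by unfold Spec_matching_socks; infer_instance

-- ===== CLAIM (what is proved, stated in full; the proofs are below) =====
def Claim_equal_matching_socks : Prop := ∀ (socks : List String), Dom_matching_socks socks → Spec_matching_socks socks (matching_socks socks)

-- ===== LEMMAS AND PROOFS =====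

def pairsSum (l : List String) : Int :=
  ((PySem.Set.ofList l).map (fun k => PySem.Int.floordiv (l.count k) 2)).sum

-- A's dict-building loop is the Counter loop (both branches insert getD+1)
lemma a_dict_eq_counter (socks : List String) :
    socks.foldl (fun d sock =>
      if d.contains sock = false then d.insert sock 1
      else d.insert sock (d.getD sock 0 + 1)) PySem.Dict.empty = PySem.Dict.counter socks := by
  rw [← PySem.Dict.foldl_insert_getD_add_one_eq_counter]
  apply PySem.List.foldl_congr_mem
  intro d x _
  by_cases h : d.contains x = false
  · rw [PySem.Dict.getD_of_not_contains (h := h)]; simp [h]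
  · simp [h]

-- A's summing loop over the counter's keys computes pairsSum
lemma a_pairs_eq (socks : List String) :
    (PySem.Dict.counter socks).keys.foldl (fun pairs pair =>
      pairs + PySem.Int.floordiv ((PySem.Dict.counter socks).getD pair 0) 2) 0
    = pairsSum socks := by
  rw [PySem.List.foldl_add]
  simp [pairsSum, PySem.Dict.keys_counter, PySem.Dict.getD_counter]


lemma floordiv_succ_two (c : Nat) :
    PySem.Int.floordiv ((c : Int) + 1) 2 =
      PySem.Int.floordiv (c : Int) 2 + (if 2 ∣ c then 0 else 1) := by
  rw [PySem.Int.floordiv_eq_ediv_of_pos (by norm_num), PySem.Int.floordiv_eq_ediv_of_pos (by norm_num)]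
  rcases Nat.even_or_odd c with ⟨m, hm⟩ | ⟨m, hm⟩ <;> subst hm <;> simp <;> omega

lemma pairsSum_append_singleton (l : List String) (x : String) :
    pairsSum (l ++ [x]) = pairsSum l + (if 2 ∣ l.count x then 0 else 1) := by
  unfold pairsSum
  rw [PySem.Set.ofList_append_singleton]
  by_cases hx : x ∈ l
  · rw [PySem.Set.add_of_mem ((PySem.Set.mem_ofList _ _).2 hx)]
    have hperm : PySem.Set.ofList l |>.Perm (x :: (PySem.Set.ofList l).erase x) :=
      List.perm_cons_erase ((PySem.Set.mem_ofList _ _).2 hx)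
    have hnd := PySem.Set.nodup_ofList (xs := l)
    rw [List.Perm.sum_eq (List.Perm.map _ hperm), List.Perm.sum_eq (List.Perm.map _ hperm)]
    simp only [List.map_cons, List.sum_cons]
    have hcongr : ∀ k ∈ (PySem.Set.ofList l).erase x,
        ((l ++ [x]).count k : Int) = (l.count k : Int) := by
      intro k hk
      have : k ≠ x := (List.Nodup.mem_erase_iff hnd |>.1 hk).1
      simp [List.count_append, Ne.symm this]
    have hmap : ((PySem.Set.ofList l).erase x).map (fun k => PySem.Int.floordiv ((l ++ [x]).count k) 2)
        = ((PySem.Set.ofList l).erase x).map (fun k => PySem.Int.floordiv ((l.count k : Int)) 2) := by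
      apply List.map_congr_left
      intro k hk; rw [hcongr k hk]
    rw [hmap]
    have hcx : ((l ++ [x]).count x : Int) = (l.count x : Int) + 1 := by
      simp [List.count_append]
    rw [hcx, floordiv_succ_two]
    ring
  · rw [PySem.Set.add_of_not_mem (fun h => hx ((PySem.Set.mem_ofList _ _).1 h))]
    have hc0 : l.count x = 0 := List.count_eq_zero.2 hx
    rw [List.map_append]
    have hmap : (PySem.Set.ofList l).map (fun k => PySem.Int.floordiv ((l ++ [x]).count k) 2)
        = (PySem.Set.ofList l).map (fun k => PySem.Int.floordiv ((l.count k : Int)) 2) := by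
      apply List.map_congr_left
      intro k hk
      have : k ≠ x := fun h => hx (h ▸ (PySem.Set.mem_ofList _ _).1 hk)
      simp [List.count_append, Ne.symm this]
    rw [hmap]
    simp [List.count_append, hc0, PySem.Int.floordiv]

def bstep (st : PySem.Set String × Int) (sock : String) : PySem.Set String × Int :=
  if PySem.Set.contains st.1 sock then (PySem.Set.discard st.1 sock, st.2 + 1)
  else (PySem.Set.add st.1 sock, st.2)

lemma b_invariant (l : List String) :
    (∀ k, k ∈ (l.foldl bstep (PySem.Set.empty, 0)).1 ↔ ¬ 2 ∣ l.count k)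
    ∧ (l.foldl bstep (PySem.Set.empty, 0)).1.Nodup
    ∧ (l.foldl bstep (PySem.Set.empty, 0)).2 = pairsSum l := by
  induction l using List.reverseRecOn with
  | nil => refine ⟨by simp [PySem.Set.empty], by simp [PySem.Set.empty], ?_⟩; rfl
  | append_singleton l x ih =>
    obtain ⟨hmem, hnd, hp⟩ := ih
    rw [List.foldl_append]
    simp only [List.foldl_cons, List.foldl_nil]
    set st := l.foldl bstep (PySem.Set.empty, 0) with hst
    rw [pairsSum_append_singleton]
    by_cases hc : PySem.Set.contains st.1 x
    · have hxin : x ∈ st.1 := (PySem.Set.contains_iff _ _).1 hc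
      have hodd : ¬ 2 ∣ l.count x := (hmem x).1 hxin
      refine ⟨?_, ?_, ?_⟩
      · intro k
        simp only [bstep, hc, if_pos, PySem.Set.mem_discard]
        by_cases hkx : k = x
        · subst hkx
          simp [List.count_append]
          omega
        · simp [hkx, hmem k, List.count_append, Ne.symm hkx]
      · simp only [bstep, hc, if_pos]
        exact PySem.Set.nodup_discard _ _ hnd
      · simp [bstep, hp, hxin, hodd]
    · have hxout : x ∉ st.1 := fun h => hc ((PySem.Set.contains_iff _ _).2 h)
      have heven : 2 ∣ l.count x := by
        by_contra h; exact hxout ((hmem x).2 h)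
      refine ⟨?_, ?_, ?_⟩
      · intro k
        simp only [bstep, hc, if_neg, Bool.false_eq_true, not_false_iff, PySem.Set.mem_add]
        by_cases hkx : k = x
        · subst hkx
          simp [List.count_append, hxout]
          omega
        · simp [hkx, hmem k, List.count_append, Ne.symm hkx]
      · simp only [bstep, hc, if_neg, Bool.false_eq_true, not_false_iff]
        exact PySem.Set.nodup_add _ _ hnd
      · simp [bstep, hp, hxout, heven]

-- ===== VERDICT (by name: the statement is the Claim_ definition above) =====
theorem matching_socks_spec : Claim_equal_matching_socks := by
  intro socks _
  unfold Spec_matching_socks matching_socks matching_socks_alt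
  simp only [a_dict_eq_counter, a_pairs_eq,
      show (fun (st : PySem.Set String × Int) sock =>
        if PySem.Set.contains st.1 sock then (PySem.Set.discard st.1 sock, st.2 + 1)
        else (PySem.Set.add st.1 sock, st.2)) = bstep from rfl,
      (b_invariant socks).2.2]
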